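-- pv_equiv track=rewrite | github.com/Ruderud/Algorithm_ect | 비밀지도.py | solution_d
-- ===== SOURCE A (Python) =====
-- def solution_d(n, arr1, arr2):
--     answer = []
--     for i,j in zip(arr1,arr2):      #zip을 이용해 arr1, arr2를 하나씩 가져와서 묶음
--         a12 = str(bin(i|j)[2:])     #각각의 2진수 str을 구한후, 이떄 둘중하나라도 1이면, 둘다0이면 0을 반환 ex) 1001|11110 -> 11111, 1001|1 ->1001
--         a12=a12.rjust(n,'0')        #rjust -> n길이의 문자열공간을 만들고, 그 공간에 대해 위의 2진수 문자열을 오른쪽정렬하여 입력하고 나머지 빈공간은 0으로 매운다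
--         a12=a12.replace('1','#')
--         a12=a12.replace('0',' ')
--         answer.append(a12)
--     return answer
--
-- n = 5
--
-- arr1 = [9, 20, 28, 18, 11]
--
-- arr2 = [30, 1, 21, 17, 28]
-- ===== SOURCE B (Python) =====
-- def solution_d(n, arr1, arr2):
--     def row(v):
--         cs = []
--         while v:
--             cs.append('#' if v & 1 else ' ')
--             v >>= 1
--         if not cs:
--             cs = [' ']
--         return ' ' * (n - len(cs)) + ''.join(reversed(cs))
--     return [row(i | j) for i, j in zip(arr1, arr2)]
-- ===== Notes on version B (the rewrite author's own statement) =====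
-- stated objective: alternative
-- what changed: B builds each row directly from the bits of i|j by repeated shift-and-mask with space left-padding, instead of A's bin()-formatting followed by rjust and two string replace passes.
-- outside the precondition, e.g. on solution_d(3, [-2], [1]): A returns [' b#'], B does not finish within the time limit
import Mathlib
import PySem

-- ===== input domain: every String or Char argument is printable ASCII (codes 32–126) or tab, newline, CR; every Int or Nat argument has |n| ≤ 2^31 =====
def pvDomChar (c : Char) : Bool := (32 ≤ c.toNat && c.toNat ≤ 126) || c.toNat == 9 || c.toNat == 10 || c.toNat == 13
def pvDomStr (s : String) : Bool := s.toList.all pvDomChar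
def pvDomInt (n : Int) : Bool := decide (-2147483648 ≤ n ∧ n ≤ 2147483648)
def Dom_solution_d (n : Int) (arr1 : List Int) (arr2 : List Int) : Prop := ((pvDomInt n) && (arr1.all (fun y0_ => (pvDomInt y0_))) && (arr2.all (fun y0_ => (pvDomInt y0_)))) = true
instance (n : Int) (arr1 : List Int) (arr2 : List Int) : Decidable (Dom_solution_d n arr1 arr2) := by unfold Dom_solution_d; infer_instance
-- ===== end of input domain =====

-- B builds each row directly from the bits of i|j by repeated shift-and-mask with space
-- left-padding, instead of A's bin()-formatting followed by rjust and two replace passes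
-- (objective: alternative decomposition, same cost).

-- ===== PORT A =====
-- str.rjust(w, c): pad on the left with c up to width w (no-op if already that long) — exact
def pvRjust (s : List Char) (w : Int) (c : Char) : List Char :=
  List.replicate (w - (s.length : Int)).toNat c ++ s

-- str.replace(old, new) for single-character old/new: exact on code points
def pvReplace1 (s : List Char) (old new : Char) : List Char :=
  s.map (fun c => if c = old then new else c)

def solution_d (n : Int) (arr1 : List Int) (arr2 : List Int) : List String :=
  (arr1.zip arr2).foldl (fun answer ij =>
    -- a12 = str(bin(i|j)[2:])  (str() on a str is the identity)
    let a12 := PySem.List.slice (PySem.Int.toBinChars0b (PySem.Int.bor ij.1 ij.2)) (some 2) none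
    let a12 := pvRjust a12 n '0'
    let a12 := pvReplace1 a12 '1' '#'
    let a12 := pvReplace1 a12 '0' ' '
    answer ++ [String.ofList a12]) []

-- ===== PORT B =====
-- the while-loop of Source B's row(): collect '#'/' ' per bit, least significant first.
-- Source B's loop terminates only for v ≥ 0 (guaranteed by Pre_), so it is ported on the Nat v.toNat.
def pvLsbRow (v : Nat) : List Char :=
  if v = 0 then [] else (if v % 2 = 1 then '#' else ' ') :: pvLsbRow (v / 2)
decreasing_by exact Nat.div_lt_self (Nat.pos_of_ne_zero (by assumption)) (by norm_num)

def solution_d_alt (n : Int) (arr1 : List Int) (arr2 : List Int) : List String :=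
  (arr1.zip arr2).map (fun ij =>
    let cs := pvLsbRow (PySem.Int.bor ij.1 ij.2).toNat
    let cs := if cs = [] then [' '] else cs
    String.ofList (List.replicate (n - (cs.length : Int)).toNat ' ' ++ cs.reverse))

-- ===== PRECONDITION & SPEC =====
-- Pre_ excludes pairs with a negative entry: there bin()'s sign handling leaves literal 'b'/'-'
-- characters in A's row (an artefact of slicing '-0b…'), and B's bit loop does not terminate.
def Pre_solution_d (n : Int) (arr1 : List Int) (arr2 : List Int) : Prop :=
  ∀ p ∈ arr1.zip arr2, 0 ≤ p.1 ∧ 0 ≤ p.2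
instance (n : Int) (arr1 : List Int) (arr2 : List Int) : Decidable (Pre_solution_d n arr1 arr2) := by
  unfold Pre_solution_d; infer_instance

def pvWitness_solution_d : Int × List Int × List Int := (5, [9, 20, 28, 18, 11], [30, 1, 21, 17, 28])

def Spec_solution_d (n : Int) (arr1 : List Int) (arr2 : List Int) (out : List String) : Prop :=
  out = solution_d_alt n arr1 arr2
instance (n : Int) (arr1 : List Int) (arr2 : List Int) (out : List String) : Decidable (Spec_solution_d n arr1 arr2 out) := by
  unfold Spec_solution_d; infer_instance

-- ===== CLAIM (what is proved, stated in full; the proofs are below) =====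
def Claim_equal_solution_d : Prop := ∀ (n : Int) (arr1 : List Int) (arr2 : List Int), Dom_solution_d n arr1 arr2 → Pre_solution_d n arr1 arr2 → Spec_solution_d n arr1 arr2 (solution_d n arr1 arr2)

-- ===== LEMMAS AND PROOFS =====

-- binary digits of m, most significant first, as bin() prints them (spec for Nat.toDigits 2)
def pvBinGo (m : Nat) : List Char :=
  if m < 2 then [Nat.digitChar m] else pvBinGo (m / 2) ++ [Nat.digitChar (m % 2)]
decreasing_by exact Nat.div_lt_self (by omega) (by norm_num)

theorem pvToDigitsCore_eq (f : Nat) : ∀ (m : Nat) (acc : List Char), m < f →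
    Nat.toDigitsCore 2 f m acc = pvBinGo m ++ acc := by
  induction f with
  | zero => intro m acc h; omega
  | succ f ih =>
    intro m acc h
    rw [Nat.toDigitsCore]
    by_cases h2 : m / 2 = 0
    · have hm : m < 2 := by omega
      rw [if_pos h2, pvBinGo, if_pos hm, Nat.mod_eq_of_lt hm]
      simp
    · have hm2 : 2 ≤ m := by omega
      rw [if_neg h2, ih (m / 2) _ (by omega)]
      conv_rhs => rw [pvBinGo]
      rw [if_neg (by omega)]
      simp

theorem pvToDigits_eq (m : Nat) : Nat.toDigits 2 m = pvBinGo m := by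
  have := pvToDigitsCore_eq (m + 1) m [] (by omega)
  simpa [Nat.toDigits] using this

theorem pvReplace1_append (s t : List Char) (o c : Char) :
    pvReplace1 (s ++ t) o c = pvReplace1 s o c ++ pvReplace1 t o c := by
  simp [pvReplace1]

theorem pvPad (p : Nat) :
    pvReplace1 (pvReplace1 (List.replicate p '0') '1' '#') '0' ' ' = List.replicate p ' ' := by
  simp [pvReplace1]

theorem pvLen_replace (s : List Char) (o c : Char) : (pvReplace1 s o c).length = s.length := by
  simp [pvReplace1]

theorem pvRow_eq (m : Nat) (h : 0 < m) :
    pvReplace1 (pvReplace1 (pvBinGo m) '1' '#') '0' ' ' = (pvLsbRow m).reverse := by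
  induction m using Nat.strong_induction_on with
  | _ m ih =>
    by_cases h2 : m < 2
    · have hm1 : m = 1 := by omega
      subst hm1
      have l0 : pvLsbRow 0 = [] := by rw [pvLsbRow]; simp
      have l1 : pvLsbRow 1 = ['#'] := by rw [pvLsbRow]; norm_num [l0]
      have b1 : pvBinGo 1 = ['1'] := by rw [pvBinGo]; norm_num [Nat.digitChar]
      rw [b1, l1]
      decide
    · rw [pvBinGo, if_neg h2]
      conv_rhs => rw [pvLsbRow, if_neg (by omega)]
      rw [pvReplace1_append, pvReplace1_append,
        ih (m / 2) (Nat.div_lt_self (by omega) (by norm_num)) (by omega)]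
      simp only [List.reverse_cons]
      congr 1
      rcases Nat.mod_two_eq_zero_or_one m with hm | hm <;> rw [hm] <;> decide

theorem pvRow_len (m : Nat) (h : 0 < m) : (pvLsbRow m).length = (pvBinGo m).length := by
  have := congrArg List.length (pvRow_eq m h)
  simpa [pvLen_replace] using this.symm

theorem pvBinGo_zero : pvBinGo 0 = ['0'] := by
  rw [pvBinGo]; norm_num [Nat.digitChar]

theorem pvPerRow (n : Int) (i j : Int) (hi : 0 ≤ i) (hj : 0 ≤ j) :
    String.ofList (pvReplace1 (pvReplace1
        (pvRjust (PySem.List.slice (PySem.Int.toBinChars0b (PySem.Int.bor i j)) (some 2) none) n '0')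
        '1' '#') '0' ' ')
    = (let cs := pvLsbRow (PySem.Int.bor i j).toNat
       let cs := if cs = [] then [' '] else cs
       String.ofList (List.replicate (n - (cs.length : Int)).toNat ' ' ++ cs.reverse)) := by
  have hv : 0 ≤ PySem.Int.bor i j := by
    rw [PySem.Int.bor_of_nonneg hi hj]; positivity
  obtain ⟨m, hm⟩ : ∃ m : Nat, PySem.Int.bor i j = (m : Int) :=
    ⟨(PySem.Int.bor i j).toNat, (Int.toNat_of_nonneg hv).symm⟩
  rw [hm]
  have hbin : PySem.List.slice (PySem.Int.toBinChars0b (m : Int)) (some 2) none = pvBinGo m := by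
    rw [PySem.List.slice_from]
    · rw [PySem.Int.toBinChars0b, if_neg (by omega)]
      simp [pvToDigits_eq]
    · norm_num
  rw [hbin]
  simp only [Int.toNat_natCast]
  by_cases hm0 : m = 0
  · subst hm0
    have l0 : pvLsbRow 0 = [] := by rw [pvLsbRow]; simp
    rw [pvBinGo_zero, l0]
    simp only [reduceIte, pvRjust, List.length_singleton, pvReplace1_append, pvPad]
    congr 2
  · have hmp : 0 < m := Nat.pos_of_ne_zero hm0
    have hne : pvLsbRow m ≠ [] := by rw [pvLsbRow, if_neg hm0]; simp
    simp only [if_neg hne]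
    rw [pvRjust, pvReplace1_append, pvReplace1_append, pvPad, pvRow_eq m hmp,
      pvRow_len m hmp]

theorem pvFoldl_append (g : Int × Int → String) (l : List (Int × Int)) : ∀ (acc : List String),
    l.foldl (fun a p => a ++ [g p]) acc = acc ++ l.map g := by
  induction l with
  | nil => simp
  | cons x xs ih => intro acc; rw [List.foldl_cons, List.map_cons, ih]; simp

-- ===== VERDICT (by name: the statement is the Claim_ definition above) =====
theorem solution_d_spec : Claim_equal_solution_d := by
  intro n arr1 arr2 _hd hpre
  unfold Spec_solution_d solution_d solution_d_alt
  rw [pvFoldl_append]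
  simp only [List.nil_append]
  apply List.map_congr_left
  intro ij hij
  obtain ⟨hi, hj⟩ := hpre ij hij
  exact pvPerRow n ij.1 ij.2 hi hj
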